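-- pv_equiv track=rewrite | github.com/JustAHobbyDev/StaticSiteGenerator | src/inline_markdown.py | parse_links_and_images
-- ===== SOURCE A (Python) =====
-- def parse_links_and_images(t):
--     chunks = []
--     i, j, k = 0, 0, 0
--     open_square, open_round = False, False
--     parsing_text = True
--     is_image = False
--     while j < len(t):
--         if t[j] == "[":
--             if not parsing_text:
--                 break
--             parsing_text = False
--             open_square = True
--             if j - 1 > 0 and t[j - 1] == "!":
--                 is_image = True
--                 k = j - 1
--             else:
--                 k = j
--         if not parsing_text:
--             if open_square:
--                 if t[j] == "]" and t[j + 1] == "(":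
--                     open_square = False
--                     open_round = True
--             if open_round and not open_square:
--                 if t[j] == ")":
--                     open_round = False
--                     parsing_text = True
--                     text_type = "image" if is_image else "url"
--                     text_chunk = ("text", t[i:k])
--                     image_or_url_chunk = (text_type, t[k:j+1])
--                     chunks.append(text_chunk)
--                     chunks.append(image_or_url_chunk)
--                     t = t[j+1:]
--                     i = 0
--                     j = 0
--         j += 1
--     if len(t) > 0:
--         chunks.append(("text", t))
--     return chunks
-- ===== SOURCE B (Python) =====
-- def parse_links_and_images(t):
--     # Single linear pass over t with an absolute base offset (no reslicing).
--     chunks = []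
--     n = len(t)
--     base = 0          # start of the pending text run
--     k = 0             # start of the current bracket construct
--     is_image = False
--     state = "text"    # "text" | "square" | "round"
--     j = 0
--     while j < n:
--         c = t[j]
--         if state == "text":
--             if c == "[":
--                 if j - 1 > base and t[j - 1] == "!":
--                     is_image = True
--                     k = j - 1
--                 else:
--                     k = j
--                 state = "square"
--             j += 1
--         elif state == "square":
--             if c == "[":
--                 break
--             if c == "]" and t[j + 1] == "(":
--                 state = "round"
--             j += 1
--         else:  # "round"
--             if c == "[":
--                 break
--             if c == ")":
--                 chunks.append(("text", t[base:k]))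
--                 chunks.append(("image" if is_image else "url", t[k:j + 1]))
--                 base = j + 1
--                 state = "text"
--                 j += 2
--             else:
--                 j += 1
--     if base < n:
--         chunks.append(("text", t[base:]))
--     return chunks
-- ===== Notes on version B (the rewrite author's own statement) =====
-- stated objective: faster
-- what changed: B replaces A's restart-and-reslice loop (t = t[j+1:] after every emitted link, with relative indices and four boolean flags) by a single linear pass over the original string using an absolute base offset and an explicit three-state machine, so no string copies are made.
import Mathlib
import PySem

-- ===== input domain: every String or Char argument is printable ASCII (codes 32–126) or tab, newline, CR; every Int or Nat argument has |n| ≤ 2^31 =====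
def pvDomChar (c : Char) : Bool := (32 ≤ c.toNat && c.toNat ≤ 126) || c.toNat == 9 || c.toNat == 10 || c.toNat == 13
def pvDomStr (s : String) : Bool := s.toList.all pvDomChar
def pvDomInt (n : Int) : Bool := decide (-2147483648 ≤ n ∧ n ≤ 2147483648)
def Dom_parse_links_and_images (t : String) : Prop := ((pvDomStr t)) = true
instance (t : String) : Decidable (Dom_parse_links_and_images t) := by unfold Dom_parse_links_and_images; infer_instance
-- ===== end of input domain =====

-- B replaces A's repeated reslicing of the string (t = t[j+1:] after every emitted link)
-- by one linear pass over the original string with an absolute base offset (faster: no copies).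
-- Return-value equivalence only; neither program mutates its argument.

-- ===== PORT A =====
-- A's while-loop; state: current string t (resliced after each emit), i j k, the four flags,
-- chunks.  The fuel argument is only a structural-recursion guard: each loop iteration strictly
-- decreases 2*len(t)-j, so the wrapper's fuel 2*len(t)+1 is never exhausted.
def pvA_loop : Nat → List Char → Nat → Nat → Nat → Bool → Bool → Bool → Bool →
    List (String × String) → List (String × String)
  | 0, _, _, _, _, _, _, _, _, _ => []          -- fuel guard only, never reached from the wrapper
  | fuel+1, t, i, j, k, osq, ornd, ptext, isimg, chunks =>
    if j < t.length then
      let c := t.getD j ' '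
      if c = '[' ∧ ptext = false then
        -- 'break', then the tail: if len(t) > 0: chunks.append(("text", t))
        if t.length > 0 then chunks ++ [("text", String.ofList t)] else chunks
      else
        -- if t[j] == "[": parsing_text = False; open_square = True; image check
        let img := j - 1 > 0 ∧ t.getD (j - 1) ' ' = '!'
        let isimg' := if c = '[' ∧ img then true else isimg
        let k' := if c = '[' then (if img then j - 1 else j) else k
        let osq' := if c = '[' then true else osq
        let ptext' := if c = '[' then false else ptext
        if ptext' = false then
          if osq' = true ∧ c = ']' then
            if j + 1 < t.length then
              if t.getD (j+1) ' ' = '(' then pvA_loop fuel t i (j+1) k' false true ptext' isimg' chunks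
              else pvA_loop fuel t i (j+1) k' osq' ornd ptext' isimg' chunks
            else []      -- Python raises IndexError reading t[j+1] (excluded by Pre_); placeholder
          else
            if ornd = true ∧ osq' = false ∧ c = ')' then
              -- emit both chunks, reslice t = t[j+1:], i = 0, j = 0 (+1 at loop bottom)
              pvA_loop fuel (PySem.List.slice t (some ((j:Int)+1)) none) 0 1 k' osq' false true isimg'
                (chunks ++ [("text", String.ofList (PySem.List.slice t (some (i:Int)) (some (k':Int)))),
                            ((if isimg' then "image" else "url"),
                              String.ofList (PySem.List.slice t (some (k':Int)) (some ((j:Int)+1))))])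
            else pvA_loop fuel t i (j+1) k' osq' ornd ptext' isimg' chunks
        else
          pvA_loop fuel t i (j+1) k' osq' ornd ptext' isimg' chunks
    else
      -- loop exit: if len(t) > 0: chunks.append(("text", t))
      if t.length > 0 then chunks ++ [("text", String.ofList t)] else chunks

def parse_links_and_images (t : String) : List (String × String) :=
  pvA_loop (2 * t.toList.length + 1) t.toList 0 0 0 false false true false []

-- ===== PORT B =====
-- B's single pass: fixed string t, its length n, absolute offsets base k j, sticky is_image,
-- state string.  The fuel argument is only a structural-recursion guard: j grows every
-- iteration, so the wrapper's fuel len(t)+1 is never exhausted.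
def pvB_loop : Nat → List Char → Nat → Nat → Nat → Nat → Bool → String →
    List (String × String) → List (String × String)
  | 0, _, _, _, _, _, _, _, chunks => chunks    -- fuel guard only, never reached from the wrapper
  | fuel+1, t, n, base, k, j, isimg, state, chunks =>
    if j < n then
      let c := t.getD j ' '
      if state = "text" then
        if c = '[' then
          if j - 1 > base ∧ t.getD (j - 1) ' ' = '!' then
            pvB_loop fuel t n base (j-1) (j+1) true "square" chunks
          else
            pvB_loop fuel t n base j (j+1) isimg "square" chunks
        else pvB_loop fuel t n base k (j+1) isimg state chunks
      else if state = "square" then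
        if c = '[' then
          -- break, then the tail: if base < n: chunks.append(("text", t[base:]))
          if base < n then chunks ++ [("text", String.ofList (PySem.List.slice t (some (base:Int)) none))] else chunks
        else if c = ']' then
          if j + 1 < n then
            if t.getD (j+1) ' ' = '(' then pvB_loop fuel t n base k (j+1) isimg "round" chunks
            else pvB_loop fuel t n base k (j+1) isimg state chunks
          else chunks  -- Python raises IndexError reading t[j+1] (excluded by Pre_); placeholder
        else pvB_loop fuel t n base k (j+1) isimg state chunks
      else
        if c = '[' then
          if base < n then chunks ++ [("text", String.ofList (PySem.List.slice t (some (base:Int)) none))] else chunks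
        else if c = ')' then
          pvB_loop fuel t n (j+1) k (j+2) isimg "text"
            (chunks ++ [("text", String.ofList (PySem.List.slice t (some (base:Int)) (some (k:Int)))),
                        ((if isimg then "image" else "url"),
                          String.ofList (PySem.List.slice t (some (k:Int)) (some ((j:Int)+1))))])
        else pvB_loop fuel t n base k (j+1) isimg state chunks
    else
      if base < n then chunks ++ [("text", String.ofList (PySem.List.slice t (some (base:Int)) none))] else chunks

def parse_links_and_images_alt (t : String) : List (String × String) :=
  pvB_loop (t.toList.length + 1) t.toList t.toList.length 0 0 0 false "text" []

-- ===== PRECONDITION & SPEC =====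
-- The only exception A can hit is the IndexError from the lookahead t[j+1], evaluated whenever a
-- ']' is scanned while a square bracket is open; pvCrash is the three-state acceptor of exactly
-- that set of strings ("a ']' is the last character and is reached with a bracket construct
-- open").  It decides only whether A raises — it builds no chunks and tracks no offsets.
inductive PvSt : Type
  | text | square | round
deriving DecidableEq, Repr

def pvCrash : List Char → PvSt → Bool
  | [], _ => false
  | c :: rest, .text => if c = '[' then pvCrash rest .square else pvCrash rest .text
  | [c], .square =>
      if c = '[' then false                    -- A breaks out of the loop: no exception
      else if c = ']' then true                -- A reads t[j+1] past the end: IndexError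
      else false
  | c :: d :: rest', .square =>
      if c = '[' then false                    -- A breaks out of the loop: no exception
      else if c = ']' then
        (if d = '(' then pvCrash (d :: rest') .round else pvCrash (d :: rest') .square)
      else pvCrash (d :: rest') .square
  | [_], .round => false                       -- a break, a final ')' or the loop end: no exception
  | c :: d :: rest', .round =>
      if c = '[' then false                    -- A breaks out of the loop: no exception
      else if c = ')' then pvCrash rest' .text -- link emitted; A skips one character (j += 2)
      else pvCrash (d :: rest') .round

-- Pre_ excludes exactly the strings on which A raises IndexError (the strings pvCrash accepts).
def Pre_parse_links_and_images (t : String) : Prop := pvCrash t.toList PvSt.text = false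
instance (t : String) : Decidable (Pre_parse_links_and_images t) := by
  unfold Pre_parse_links_and_images; infer_instance

def pvWitness_parse_links_and_images : String := "a [b](c) d"

def Spec_parse_links_and_images (t : String) (out : List (String × String)) : Prop :=
  out = parse_links_and_images_alt t
instance (t : String) (out : List (String × String)) : Decidable (Spec_parse_links_and_images t out) := by
  unfold Spec_parse_links_and_images; infer_instance

-- ===== CLAIM (what is proved, stated in full; the proofs are below) =====
def Claim_equal_parse_links_and_images : Prop :=
  ∀ (t : String), Dom_parse_links_and_images t → Pre_parse_links_and_images t →
    Spec_parse_links_and_images t (parse_links_and_images t)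

-- ===== LEMMAS AND PROOFS =====

set_option maxRecDepth 8192 in
set_option maxHeartbeats 1000000 in
theorem pv_loop_eq (t : List Char) :
    ∀ (m mB base jA kA kB : Nat) (isimg : Bool) (chunks : List (String × String))
      (st : String) (ps : PvSt) (osq ornd ptext : Bool),
      (st = "text" ∧ ps = PvSt.text ∧ ptext = true ∧ osq = false ∧ ornd = false ∨
       st = "square" ∧ ps = PvSt.square ∧ ptext = false ∧ osq = true ∧ ornd = false ∧ kB = base + kA ∨
       st = "round" ∧ ps = PvSt.round ∧ ptext = false ∧ osq = false ∧ ornd = true ∧ kB = base + kA) →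
      base ≤ t.length →
      pvCrash (t.drop (base + jA)) ps = false →
      2 * (t.length - base) - jA < m →
      t.length - (base + jA) < mB →
      pvA_loop m (t.drop base) 0 jA kA osq ornd ptext isimg chunks
        = pvB_loop mB t t.length base kB (base + jA) isimg st chunks := by
  intro m
  induction m with
  | zero =>
    intro mB base jA kA kB isimg chunks st ps osq ornd ptext _ hbase hscan hm hmB
    omega
  | succ m ih =>
    intro mB base jA kA kB isimg chunks st ps osq ornd ptext hst hbase hscan hm hmB
    cases mB with
    | zero => exact absurd hmB (by omega)
    | succ mB =>
    have hdl : (t.drop base).length = t.length - base := List.length_drop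
    simp only [pvA_loop, pvB_loop]
    by_cases hlt : base + jA < t.length
    case neg =>
      have h1 : ¬ jA < (t.drop base).length := by rw [hdl]; omega
      rw [if_neg h1, if_neg hlt]
      simp only [PySem.List.slice_from_natCast, hdl]
      by_cases hb : base < t.length
      · rw [if_pos (show t.length - base > 0 by omega), if_pos hb]
      · rw [if_neg (show ¬ t.length - base > 0 by omega), if_neg hb]
    case pos =>
      have h1 : jA < (t.drop base).length := by rw [hdl]; omega
      rw [if_pos h1, if_pos hlt]
      have hdrop : t.drop (base + jA) = t[base + jA] :: t.drop (base + jA + 1) :=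
        List.drop_eq_getElem_cons hlt
      have hgv : t[base + jA]?.getD ' ' = t[base + jA] := by
        rw [List.getElem?_eq_getElem hlt]; rfl
      rcases hst with ⟨hst, hps, hpt, hosq, hornd⟩ | ⟨hst, hps, hpt, hosq, hornd, hkB⟩ |
        ⟨hst, hps, hpt, hosq, hornd, hkB⟩ <;> subst hst <;> subst hps <;> subst hpt <;>
        subst hosq <;> subst hornd
      -- ===== state "text" =====
      · by_cases hc : t[base + jA]?.getD ' ' = '['
        · have hc' : t[base + jA] = '[' := by rw [← hgv]; exact hc
          have hscan' : pvCrash (t.drop (base + jA + 1)) PvSt.square = false := by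
            rw [hdrop] at hscan; simp only [pvCrash] at hscan
            rw [if_pos hc'] at hscan; exact hscan
          by_cases h2 : 1 < jA
          · have hidx : base + (jA - 1) = base + jA - 1 := by omega
            by_cases hbang : t[base + jA - 1]?.getD ' ' = '!'
            · simp [hc, hidx, h2, hbang, show base < base + jA - 1 from by omega]
              exact ih mB base (jA+1) (jA-1) (base+jA-1) true chunks "square" PvSt.square true false false
                (Or.inr (Or.inl ⟨rfl, rfl, rfl, rfl, rfl, by omega⟩)) hbase
                (by rw [show base + (jA+1) = base + jA + 1 from by omega]; exact hscan')
                (by omega) (by omega)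
            · simp [hc, hidx, hbang]
              exact ih mB base (jA+1) jA (base+jA) isimg chunks "square" PvSt.square true false false
                (Or.inr (Or.inl ⟨rfl, rfl, rfl, rfl, rfl, rfl⟩)) hbase
                (by rw [show base + (jA+1) = base + jA + 1 from by omega]; exact hscan')
                (by omega) (by omega)
          · simp [hc, h2, show ¬ (base < base + jA - 1) from by omega]
            exact ih mB base (jA+1) jA (base+jA) isimg chunks "square" PvSt.square true false false
              (Or.inr (Or.inl ⟨rfl, rfl, rfl, rfl, rfl, rfl⟩)) hbase
              (by rw [show base + (jA+1) = base + jA + 1 from by omega]; exact hscan')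
              (by omega) (by omega)
        · have hc' : ¬ t[base + jA] = '[' := by rw [← hgv]; exact hc
          have hscan' : pvCrash (t.drop (base + jA + 1)) PvSt.text = false := by
            rw [hdrop] at hscan; simp only [pvCrash] at hscan
            rw [if_neg hc'] at hscan; exact hscan
          simp [hc]
          exact ih mB base (jA+1) kA kB isimg chunks "text" PvSt.text false false true
            (Or.inl ⟨rfl, rfl, rfl, rfl, rfl⟩) hbase
            (by rw [show base + (jA+1) = base + jA + 1 from by omega]; exact hscan')
            (by omega) (by omega)
      -- ===== state "square" =====
      · subst hkB
        by_cases hc : t[base + jA]?.getD ' ' = '['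
        · simp [hc, hdl, PySem.List.slice_from_natCast, show base < t.length from by omega,
            show 0 < t.length - base from by omega]
        · have hc' : ¬ t[base + jA] = '[' := by rw [← hgv]; exact hc
          by_cases hsq : t[base + jA]?.getD ' ' = ']'
          · have hsq' : t[base + jA] = ']' := by rw [← hgv]; exact hsq
            by_cases h2 : base + jA + 1 < t.length
            · have hdrop2 : t.drop (base + jA + 1) = t[base + jA + 1] :: t.drop (base + jA + 2) :=
                List.drop_eq_getElem_cons h2
              rw [hdrop, hdrop2] at hscan
              simp only [pvCrash] at hscan
              rw [if_neg hc', if_pos hsq'] at hscan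
              simp [hsq, show base + (jA + 1) = base + jA + 1 from by omega,
                show jA + 1 < t.length - base from by omega, h2]
              split_ifs with hpar
              · rw [if_pos hpar, ← hdrop2] at hscan
                exact ih mB base (jA+1) kA (base+kA) isimg chunks "round" PvSt.round false true false
                  (Or.inr (Or.inr ⟨rfl, rfl, rfl, rfl, rfl, rfl⟩)) hbase
                  (by rw [show base + (jA+1) = base + jA + 1 from by omega]; exact hscan)
                  (by omega) (by omega)
              · rw [if_neg hpar, ← hdrop2] at hscan
                exact ih mB base (jA+1) kA (base+kA) isimg chunks "square" PvSt.square true false false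
                  (Or.inr (Or.inl ⟨rfl, rfl, rfl, rfl, rfl, rfl⟩)) hbase
                  (by rw [show base + (jA+1) = base + jA + 1 from by omega]; exact hscan)
                  (by omega) (by omega)
            · -- A's Python raises IndexError here; such strings are outside Pre_ (pvCrash accepts)
              exfalso
              have hnil : t.drop (base + jA + 1) = [] := List.drop_eq_nil_of_le (by omega)
              rw [hdrop, hnil] at hscan
              simp only [pvCrash] at hscan
              rw [if_neg hc', if_pos hsq'] at hscan
              exact absurd hscan (by simp)
          · have hsq' : ¬ t[base + jA] = ']' := by rw [← hgv]; exact hsq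
            have hscan' : pvCrash (t.drop (base + jA + 1)) PvSt.square = false := by
              by_cases h2 : base + jA + 1 < t.length
              · have hdrop2 : t.drop (base + jA + 1) = t[base + jA + 1] :: t.drop (base + jA + 2) :=
                  List.drop_eq_getElem_cons h2
                rw [hdrop, hdrop2] at hscan
                simp only [pvCrash] at hscan
                rw [if_neg hc', if_neg hsq'] at hscan
                rw [hdrop2]; exact hscan
              · rw [List.drop_eq_nil_of_le (by omega)]; rfl
            simp [hc, hsq]
            exact ih mB base (jA+1) kA (base+kA) isimg chunks "square" PvSt.square true false false
              (Or.inr (Or.inl ⟨rfl, rfl, rfl, rfl, rfl, rfl⟩)) hbase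
              (by rw [show base + (jA+1) = base + jA + 1 from by omega]; exact hscan')
              (by omega) (by omega)
      -- ===== state "round" =====
      · subst hkB
        by_cases hc : t[base + jA]?.getD ' ' = '['
        · simp [hc, hdl, PySem.List.slice_from_natCast, show base < t.length from by omega,
            show 0 < t.length - base from by omega]
        · have hc' : ¬ t[base + jA] = '[' := by rw [← hgv]; exact hc
          by_cases hrd : t[base + jA]?.getD ' ' = ')'
          · have hrd' : t[base + jA] = ')' := by rw [← hgv]; exact hrd
            have hscan' : pvCrash (t.drop (base + jA + 2)) PvSt.text = false := by
              by_cases h2 : base + jA + 1 < t.length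
              · have hdrop2 : t.drop (base + jA + 1) = t[base + jA + 1] :: t.drop (base + jA + 2) :=
                  List.drop_eq_getElem_cons h2
                rw [hdrop, hdrop2] at hscan
                simp only [pvCrash] at hscan
                rw [if_neg hc', if_pos hrd'] at hscan
                exact hscan
              · rw [List.drop_eq_nil_of_le (by omega)]; rfl
            have hcast : ((jA : Int) + 1) = (((jA + 1 : Nat)) : Int) := by push_cast; ring
            have hcast2 : ((base + jA : Nat) : Int) + 1 = (((base + jA + 1 : Nat)) : Int) := by
              push_cast; ring
            simp only [hcast, hcast2, PySem.List.slice_natCast,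
              PySem.List.slice_from_natCast, List.drop_drop, Nat.sub_zero,
              show base + jA + 1 - (base + kA) = jA + 1 - kA from by omega,
              show base + kA - base = kA from by omega]
            simp [hrd]
            rw [show base + jA + 2 = (base + jA + 1) + 1 from by omega]
            exact ih mB (base+jA+1) 1 kA (base+kA) isimg _ "text" PvSt.text false false true
              (Or.inl ⟨rfl, rfl, rfl, rfl, rfl⟩) (by omega)
              (by rw [show base + jA + 1 + 1 = base + jA + 2 from by omega]; exact hscan')
              (by omega) (by omega)
          · have hrd' : ¬ t[base + jA] = ')' := by rw [← hgv]; exact hrd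
            have hscan' : pvCrash (t.drop (base + jA + 1)) PvSt.round = false := by
              by_cases h2 : base + jA + 1 < t.length
              · have hdrop2 : t.drop (base + jA + 1) = t[base + jA + 1] :: t.drop (base + jA + 2) :=
                  List.drop_eq_getElem_cons h2
                rw [hdrop, hdrop2] at hscan
                simp only [pvCrash] at hscan
                rw [if_neg hc', if_neg hrd'] at hscan
                rw [hdrop2]; exact hscan
              · rw [List.drop_eq_nil_of_le (by omega)]; rfl
            simp [hc, hrd]
            exact ih mB base (jA+1) kA (base+kA) isimg chunks "round" PvSt.round false true false
              (Or.inr (Or.inr ⟨rfl, rfl, rfl, rfl, rfl, rfl⟩)) hbase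
              (by rw [show base + (jA+1) = base + jA + 1 from by omega]; exact hscan')
              (by omega) (by omega)

-- ===== VERDICT (by name: the statement is the Claim_ definition above) =====
theorem parse_links_and_images_spec : Claim_equal_parse_links_and_images := by
  intro t _hdom hpre
  unfold Spec_parse_links_and_images parse_links_and_images parse_links_and_images_alt
  have h := pv_loop_eq t.toList (2 * t.toList.length + 1) (t.toList.length + 1) 0 0 0 0 false
    [] "text" PvSt.text false false true (Or.inl ⟨rfl, rfl, rfl, rfl, rfl⟩) (Nat.zero_le _)
    (by simpa using hpre) (by omega) (by omega)
  simpa using h
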